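-- pv_equiv track=rewrite | github.com/takutaku-handa/lattice | main.py | make_lattice
-- ===== SOURCE A (Python) =====
-- def make_lattice(context_: str, dictionary_: dict):
--     # 解析対象の文字列の中から、辞書にあるものをリストアップする
--     use_words = []
--     length = len(context_)
--     for start in range(length):
--         first_char = context_[start]
--         for key, data in dict.items(dictionary_):
--             word = data[0]
--             if word[0] == first_char:
--                 use_words.append([start, start + len(word), key, word])
--
--     # リストアップした単語のすべての繋がり方を後ろから求める
--     lattice_list = [[length, [-1]]]  # [[(先頭の位置), [(先頭を除く単語列)]]]
--     flag = length
--     while flag > 0:  # すべての繋がり方が解析対象の文字列の先頭までいけば終わり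
--         tmp = []
--         for head_and_lattice in lattice_list:
--             head = head_and_lattice[0]
--             if head > 0:
--                 for word in use_words:
--                     if word[1] == head:
--                         tmp.append([word[0], [word[2]] + head_and_lattice[1]])
--             else:
--                 tmp.append(head_and_lattice)
--         lattice_list = tmp
--         flag = max([i[0] for i in lattice_list])
--
--     return [[0] + i[1] for i in lattice_list]  # [[0, i, j, ..., -1], [...], ... ] ijkは辞書のkeyに対応
-- ===== SOURCE B (Python) =====
-- def make_lattice(context_: str, dictionary_: dict):
--     length = len(context_)
--     # index the dictionary words by their first character
--     by_first = {}
--     for key, data in dictionary_.items():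
--         word = data[0]
--         by_first.setdefault(word[0], []).append((key, len(word)))
--     # for every end position, the (start, key) matches ending there,
--     # in the same order A lists use_words (start ascending, then dict order)
--     by_end = {}
--     for start, ch in enumerate(context_):
--         for key, wlen in by_first.get(ch, ()):
--             by_end.setdefault(start + wlen, []).append((start, key))
--     # dynamic programming over positions: paths[h] = all key sequences covering context_[:h]
--     paths = [[] for _ in range(length + 1)]
--     paths[0] = [[]]
--     for h in range(1, length + 1):
--         paths[h] = [q + [key] for start, key in by_end.get(h, []) for q in paths[start]]
--     return [[0] + q + [-1] for q in paths[length]]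
-- ===== Notes on version B (the rewrite author's own statement) =====
-- stated objective: alternative
-- what changed: B replaces A's layered while-loop (which rescans the whole dictionary per position and the whole use_words list per partial path per round) with a first-character index, an end-position index, and a single bottom-up DP over positions; it avoids A's rescans, but the exponential output size dominates, so same measured cost.
-- outside the precondition, e.g. on make_lattice('', {1: ['']}): A returns [[0, -1]], B raises IndexError
import Mathlib
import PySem

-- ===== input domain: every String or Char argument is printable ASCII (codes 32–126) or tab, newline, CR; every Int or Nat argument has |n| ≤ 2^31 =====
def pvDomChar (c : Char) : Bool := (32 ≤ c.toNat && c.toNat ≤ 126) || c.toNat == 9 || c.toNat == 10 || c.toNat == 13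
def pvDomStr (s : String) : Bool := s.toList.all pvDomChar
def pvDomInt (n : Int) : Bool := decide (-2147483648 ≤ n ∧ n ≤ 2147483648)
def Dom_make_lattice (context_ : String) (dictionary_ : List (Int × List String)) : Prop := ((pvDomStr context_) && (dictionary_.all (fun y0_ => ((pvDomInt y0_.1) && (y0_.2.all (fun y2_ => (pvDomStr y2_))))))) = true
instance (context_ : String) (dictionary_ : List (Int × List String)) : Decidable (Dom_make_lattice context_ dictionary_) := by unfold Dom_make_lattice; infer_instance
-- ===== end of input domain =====

-- B replaces A's repeated full scans of the dictionary and of use_words by first-character /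
-- end-position indexes and a bottom-up DP over positions (alternative enumeration, same exact output).

-- ===== PORT A =====
-- use_words items [start, start+len(word), key, word] as tuples (start, end, key, word)
def pvA_useWords (cs : List Char) (dictionary_ : List (Int × List String)) : List (Int × Int × Int × List Char) :=
  (List.range cs.length).foldl (fun acc start =>
    dictionary_.foldl (fun acc2 kd =>
      let word := (kd.2.headD "").toList   -- data[0]; the empty default is outside Pre_ (IndexError)
      if word.headD ' ' == cs.getD start ' ' then  -- word[0] == first_char; defaults unreachable under Pre_
        acc2 ++ [((start : Int), ((start : Int) + (word.length : Int), (kd.1, word)))]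
      else acc2) acc) []

-- one pass of the while-loop body (building tmp)
def pvA_step (uw : List (Int × Int × Int × List Char)) (lattice_list : List (Int × List Int)) :
    List (Int × List Int) :=
  lattice_list.foldl (fun tmp hal =>
    if 0 < hal.1 then
      uw.foldl (fun t w => if w.2.1 == hal.1 then t ++ [(w.1, w.2.2.1 :: hal.2)] else t) tmp
    else tmp ++ [hal]) []

-- flag = max((i[0] for i in lattice_list)); heads are always ≥ 0, so seeding with 0 is exact on
-- nonempty lists; the empty list (Python: ValueError) is excluded by Pre_
def pvA_flag (L : List (Int × List Int)) : Int := (L.map (·.1)).foldl max 0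

-- the while-loop; fuel cs.length suffices under Pre_ (the maximal head strictly decreases each pass)
def pvA_go (uw : List (Int × Int × Int × List Char)) : Nat → List (Int × List Int) → List (Int × List Int)
  | 0, L => L
  | n+1, L => if 0 < pvA_flag L then pvA_go uw n (pvA_step uw L) else L

def make_lattice (context_ : String) (dictionary_ : List (Int × List String)) : List (List Int) :=
  let cs := context_.toList
  let uw := pvA_useWords cs dictionary_
  let final := pvA_go uw cs.length [((cs.length : Int), [-1])]
  final.map (fun e => 0 :: e.2)

-- ===== PORT B =====
-- d.setdefault(k, []).append(v)  (i.e. d[k] = d.get(k, []) + [v])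
def pvB_push {κ ν : Type} [BEq κ] (d : PySem.Dict κ (List ν)) (k : κ) (v : ν) : PySem.Dict κ (List ν) :=
  d.modify k [] (fun l => l ++ [v])

def pvB_byFirst (dictionary_ : List (Int × List String)) : PySem.Dict Char (List (Int × Int)) :=
  dictionary_.foldl (fun d kd =>
    let word := (kd.2.headD "").toList   -- data[0]; empty default outside Pre_
    pvB_push d (word.headD ' ') (kd.1, (word.length : Int))) PySem.Dict.empty

def pvB_byEnd (cs : List Char) (bf : PySem.Dict Char (List (Int × Int))) :
    PySem.Dict Int (List (Int × Int)) :=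
  (PySem.List.enumerate cs).foldl (fun d sc =>
    (bf.getD sc.2 []).foldl (fun d2 kw => pvB_push d2 (sc.1 + kw.2) (sc.1, kw.1)) d) PySem.Dict.empty

def make_lattice_alt (context_ : String) (dictionary_ : List (Int × List String)) : List (List Int) :=
  let cs := context_.toList
  let length := cs.length
  let be := pvB_byEnd cs (pvB_byFirst dictionary_)
  -- Python preallocates paths[0..length] = [] and fills slot h at step h, reading only slots < h
  -- (or an untouched slot, still []); appending levels with getD [] reads the same values
  let paths : List (List (List Int)) :=
    (PySem.List.pyRange 1 ((length : Int) + 1)).foldl (fun ps h =>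
      ps ++ [(be.getD h []).foldl (fun lvl sk => lvl ++ ((ps.getD sk.1.toNat []).map (fun q => q ++ [sk.2]))) []]) [[[]]]
  (paths.getD length []).map (fun q => 0 :: (q ++ [-1]))

-- ===== PRECONDITION & SPEC =====
-- every dictionary value is a nonempty list whose first word is nonempty (else data[0] / word[0] raise)
def pvGoodWord (kd : Int × List String) : Bool := !kd.2.isEmpty && !(kd.2.headD "").toList.isEmpty

-- pvReachRow cs dict n = [reachable 0, …, reachable (n-1)] : the standard word-chain
-- segmentability DP (position h is reachable from 0 by words matching A's first-char rule)
def pvReachRow (cs : List Char) (dictionary_ : List (Int × List String)) : Nat → List Bool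
  | 0 => []
  | n+1 =>
    let r := pvReachRow cs dictionary_ n
    r ++ [if n = 0 then true else
      dictionary_.any (fun kd =>
        let w := (kd.2.headD "").toList
        decide (0 < w.length) && decide (w.length ≤ n) && decide (n - w.length < cs.length) &&
        (cs.getD (n - w.length) ' ' == w.headD ' ') && r.getD (n - w.length) false)]

def pvReach (cs : List Char) (dictionary_ : List (Int × List String)) (h : Nat) : Bool :=
  (pvReachRow cs dictionary_ (h+1)).getD h false

-- Pre_ excludes exactly the inputs where Python A raises: a dictionary value [] or with an empty
-- first word (IndexError; when the context is empty A never touches the dictionary and returns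
-- [[0, -1]], but that degenerate corner is excluded too because B's index build still reads data[0]),
-- and a nonempty context with no complete word chain (max([]) raises ValueError; B returns [] there).
def Pre_make_lattice (context_ : String) (dictionary_ : List (Int × List String)) : Prop :=
  (∀ kd ∈ dictionary_, pvGoodWord kd = true) ∧
  (context_.toList = [] ∨ pvReach context_.toList dictionary_ context_.toList.length = true)
instance (context_ : String) (dictionary_ : List (Int × List String)) : Decidable (Pre_make_lattice context_ dictionary_) := by unfold Pre_make_lattice; infer_instance

def pvWitness_make_lattice : String × (List (Int × List String)) := ("abab", [(1, ["ab"]), (2, ["b"]), (3, ["abab"])])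

def Spec_make_lattice (context_ : String) (dictionary_ : List (Int × List String)) (out : List (List Int)) : Prop := out = make_lattice_alt context_ dictionary_
instance (context_ : String) (dictionary_ : List (Int × List String)) (out : List (List Int)) : Decidable (Spec_make_lattice context_ dictionary_ out) := by unfold Spec_make_lattice; infer_instance

-- ===== CLAIM (what is proved, stated in full; the proofs are below) =====
def Claim_equal_make_lattice : Prop := ∀ (context_ : String) (dictionary_ : List (Int × List String)), Dom_make_lattice context_ dictionary_ → Pre_make_lattice context_ dictionary_ → Spec_make_lattice context_ dictionary_ (make_lattice context_ dictionary_)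

-- ===== LEMMAS AND PROOFS =====

-- the common spec: pvF uw h = all key sequences q (in A's emission order) such that the word
-- entries in uw chain from position 0 to position h
def pvF (uw : List (Int × Int × Int × List Char)) : Nat → List (List Int)
  | 0 => [[]]
  | h+1 => uw.flatMap (fun w =>
      if hg : w.2.1 = (h : Int) + 1 ∧ 0 ≤ w.1 ∧ w.1.toNat < h + 1 then
        (pvF uw w.1.toNat).map (fun q => q ++ [w.2.2.1])
      else [])
  termination_by h => h
  decreasing_by exact hg.2.2

def pvXe (uw : List (Int × Int × Int × List Char)) (e : Int × List Int) : List (List Int) :=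
  (pvF uw e.1.toNat).map (fun q => q ++ e.2)

def pvExpand (uw : List (Int × Int × Int × List Char)) (e : Int × List Int) : List (Int × List Int) :=
  if 0 < e.1 then (uw.filter (fun w => w.2.1 == e.1)).map (fun w => (w.1, w.2.2.1 :: e.2)) else [e]

def pvGoodUW (uw : List (Int × Int × Int × List Char)) : Prop := ∀ w ∈ uw, 0 ≤ w.1 ∧ w.1 < w.2.1

lemma pv_flatMap_filter_map {α β γ : Type} (l : List α) (p : α → Bool) (f : α → β) (g : β → List γ) :
    ((l.filter p).map f).flatMap g = l.flatMap (fun x => if p x then g (f x) else []) := by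
  rw [List.flatMap_map]
  induction l with
  | nil => rfl
  | cons x xs ih =>
    by_cases hx : p x <;> simp [hx, ih]

lemma pvA_useWords_eq (cs : List Char) (dict : List (Int × List String)) :
    pvA_useWords cs dict = (List.range cs.length).flatMap (fun s =>
      (dict.filter (fun kd => (kd.2.headD "").toList.headD ' ' == cs.getD s ' ')).map
        (fun kd => ((s : Int), ((s : Int) + (((kd.2.headD "").toList.length : Int)), (kd.1, (kd.2.headD "").toList))))) := by
  unfold pvA_useWords
  have h1 : ∀ (acc : List (Int × Int × Int × List Char)) (s : Nat),
      dict.foldl (fun acc2 kd =>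
        let word := (kd.2.headD "").toList
        if word.headD ' ' == cs.getD s ' ' then
          acc2 ++ [((s : Int), ((s : Int) + (word.length : Int), (kd.1, word)))]
        else acc2) acc
      = acc ++ (dict.filter (fun kd => (kd.2.headD "").toList.headD ' ' == cs.getD s ' ')).map
          (fun kd => ((s : Int), ((s : Int) + (((kd.2.headD "").toList.length : Int)), (kd.1, (kd.2.headD "").toList)))) :=
    fun acc s => PySem.List.foldl_append_if _ _ _ _
  simp only [h1]
  rw [PySem.List.foldl_append_eq_flatMap]
  rfl

lemma pv_goodUW (cs : List Char) (dict : List (Int × List String))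
    (hg : ∀ kd ∈ dict, pvGoodWord kd = true) : pvGoodUW (pvA_useWords cs dict) := by
  intro w hw
  rw [pvA_useWords_eq, List.mem_flatMap] at hw
  obtain ⟨s, _, hw⟩ := hw
  rw [List.mem_map] at hw
  obtain ⟨kd, hkd, rfl⟩ := hw
  have := hg kd (List.mem_filter.1 hkd).1
  unfold pvGoodWord at this
  have hne : (kd.2.headD "").toList ≠ [] := by
    simp only [Bool.and_eq_true, Bool.not_eq_true', List.isEmpty_eq_false_iff] at this
    exact this.2
  have hlen : 0 < (kd.2.headD "").toList.length := List.length_pos_iff.2 hne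
  constructor
  · exact Int.natCast_nonneg s
  · simp only []
    omega

lemma pvA_step_eq (uw : List (Int × Int × Int × List Char)) (L : List (Int × List Int)) :
    pvA_step uw L = L.flatMap (pvExpand uw) := by
  unfold pvA_step
  have h1 : ∀ (tmp : List (Int × List Int)) (hal : Int × List Int),
      (if 0 < hal.1 then
        uw.foldl (fun t w => if w.2.1 == hal.1 then t ++ [(w.1, w.2.2.1 :: hal.2)] else t) tmp
      else tmp ++ [hal])
      = tmp ++ pvExpand uw hal := by
    intro tmp hal
    unfold pvExpand
    split
    · exact PySem.List.foldl_append_if _ _ _ _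
    · rfl
  simp only [h1]
  rw [PySem.List.foldl_append_eq_flatMap]
  rfl

lemma pv_expand_Xe (uw : List (Int × Int × Int × List Char)) (hP : pvGoodUW uw)
    (e : Int × List Int) :
    (pvExpand uw e).flatMap (pvXe uw) = pvXe uw e := by
  unfold pvExpand
  by_cases h : 0 < e.1
  · rw [if_pos h, pv_flatMap_filter_map]
    obtain ⟨k, hk⟩ : ∃ k, e.1.toNat = k + 1 := ⟨e.1.toNat - 1, by omega⟩
    conv_rhs => rw [pvXe, hk, pvF]
    rw [List.map_flatMap]
    apply List.flatMap_congr
    intro w hw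
    obtain ⟨hw0, hwlt⟩ := hP w hw
    by_cases hend : w.2.1 = e.1
    · rw [if_pos (by simpa using hend)]
      rw [dif_pos ⟨by omega, hw0, by omega⟩]
      unfold pvXe
      simp [Function.comp_def]
    · rw [if_neg (by simpa using hend)]
      rw [dif_neg (by omega)]
      rfl
  · rw [if_neg h]
    simp

lemma pv_step_Xe (uw : List (Int × Int × Int × List Char)) (hP : pvGoodUW uw)
    (L : List (Int × List Int)) :
    (pvA_step uw L).flatMap (pvXe uw) = L.flatMap (pvXe uw) := by
  rw [pvA_step_eq, List.flatMap_assoc]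
  exact List.flatMap_congr (fun e _ => pv_expand_Xe uw hP e)

lemma pv_mem_step (uw : List (Int × Int × Int × List Char)) (hP : pvGoodUW uw)
    {L : List (Int × List Int)} {b : Int} (hb : 1 ≤ b) (hL : ∀ e ∈ L, 0 ≤ e.1 ∧ e.1 ≤ b) :
    ∀ e ∈ pvA_step uw L, 0 ≤ e.1 ∧ e.1 ≤ b - 1 := by
  rw [pvA_step_eq]
  intro e he
  rw [List.mem_flatMap] at he
  obtain ⟨p, hp, he⟩ := he
  unfold pvExpand at he
  by_cases h : 0 < p.1
  · rw [if_pos h] at he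
    rw [List.mem_map] at he
    obtain ⟨w, hw, rfl⟩ := he
    obtain ⟨h1, h2⟩ := hP w (List.mem_filter.1 hw).1
    have heq : w.2.1 = p.1 := by simpa using (List.mem_filter.1 hw).2
    have := (hL p hp).2
    exact ⟨h1, by omega⟩
  · rw [if_neg h] at he
    rw [List.mem_singleton] at he
    subst he
    have := hL e hp
    omega

lemma pv_go_spec (uw : List (Int × Int × Int × List Char)) (hP : pvGoodUW uw) :
    ∀ (fuel : Nat) (L : List (Int × List Int)), (∀ e ∈ L, 0 ≤ e.1 ∧ e.1 ≤ (fuel : Int)) →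
    (pvA_go uw fuel L).flatMap (pvXe uw) = L.flatMap (pvXe uw) ∧
      ∀ e ∈ pvA_go uw fuel L, e.1 = 0 := by
  intro fuel
  induction fuel with
  | zero =>
    intro L hL
    refine ⟨rfl, fun e he => ?_⟩
    have := hL e he
    simp only [Int.natCast_zero] at this
    omega
  | succ n ih =>
    intro L hL
    rw [pvA_go]
    by_cases hf : 0 < pvA_flag L
    · rw [if_pos hf]
      have hstep := pv_mem_step uw hP (b := (n : Int) + 1) (by omega)
        (fun e he => by have := hL e he; push_cast at this; exact this)
      obtain ⟨ih1, ih2⟩ := ih (pvA_step uw L)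
        (fun e he => ⟨(hstep e he).1, by have := (hstep e he).2; omega⟩)
      exact ⟨ih1.trans (pv_step_Xe uw hP L), ih2⟩
    · rw [if_neg hf]
      refine ⟨rfl, fun e he => ?_⟩
      have h2 := (PySem.List.le_foldl_max (L.map (·.1)) 0).2 e.1
        (List.mem_map_of_mem he)
      have := hL e he
      unfold pvA_flag at hf
      omega

lemma pv_flatMap_Xe_zero (uw : List (Int × Int × Int × List Char)) (L : List (Int × List Int))
    (h : ∀ e ∈ L, e.1 = 0) : L.flatMap (pvXe uw) = L.map (·.2) := by
  have h1 : ∀ e ∈ L, pvXe uw e = [e.2] := by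
    intro e he
    unfold pvXe
    rw [h e he]
    simp [pvF]
  rw [List.flatMap_congr h1, ← List.map_eq_flatMap]

lemma pvA_main (context_ : String) (dict : List (Int × List String))
    (hg : ∀ kd ∈ dict, pvGoodWord kd = true) :
    make_lattice context_ dict =
      (pvF (pvA_useWords context_.toList dict) context_.toList.length).map (fun q => 0 :: (q ++ [-1])) := by
  unfold make_lattice
  have hP := pv_goodUW context_.toList dict hg
  obtain ⟨hflat, hzero⟩ := pv_go_spec (pvA_useWords context_.toList dict) hP
    context_.toList.length [((context_.toList.length : Int), [-1])]
    (by intro e he; rw [List.mem_singleton] at he; subst he; simp)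
  have hmap : (pvA_go (pvA_useWords context_.toList dict) context_.toList.length
      [((context_.toList.length : Int), [-1])]).map (·.2)
      = (pvF (pvA_useWords context_.toList dict) context_.toList.length).map (fun q => q ++ [-1]) := by
    rw [← pv_flatMap_Xe_zero _ _ hzero, hflat]
    simp [pvXe]
  calc (pvA_go (pvA_useWords context_.toList dict) context_.toList.length
      [((context_.toList.length : Int), [-1])]).map (fun e => 0 :: e.2)
      = ((pvA_go (pvA_useWords context_.toList dict) context_.toList.length
        [((context_.toList.length : Int), [-1])]).map (·.2)).map (fun q => 0 :: q) := by
        rw [List.map_map]; rfl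
    _ = _ := by rw [hmap, List.map_map]; rfl

lemma pvB_byFirst_getD (dict : List (Int × List String)) (c : Char) :
    (pvB_byFirst dict).getD c [] =
      (dict.filter (fun kd => (kd.2.headD "").toList.headD ' ' == c)).map
        (fun kd => (kd.1, ((kd.2.headD "").toList.length : Int))) := by
  unfold pvB_byFirst pvB_push
  have h1 : dict.foldl (fun d kd =>
        let word := (kd.2.headD "").toList
        (d.modify (word.headD ' ') [] (fun l => l ++ [(kd.1, (word.length : Int))])))
        (PySem.Dict.empty : PySem.Dict Char (List (Int × Int)))
      = (dict.map (fun kd => ((kd.2.headD "").toList.headD ' ',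
          (kd.1, ((kd.2.headD "").toList.length : Int))))).foldl
          (fun d p => d.modify p.1 [] (fun l => l ++ [p.2])) PySem.Dict.empty := by
    rw [List.foldl_map]
  rw [h1, PySem.Dict.getD_foldl_modify_append, List.filter_map, List.map_map]
  simp [PySem.Dict.getD_empty, Function.comp_def]

def pvPairs (cs : List Char) (bf : PySem.Dict Char (List (Int × Int))) : List (Int × (Int × Int)) :=
  (PySem.List.enumerate cs).flatMap (fun sc => (bf.getD sc.2 []).map (fun kw => (sc.1 + kw.2, (sc.1, kw.1))))

lemma pvB_byEnd_getD (cs : List Char) (bf : PySem.Dict Char (List (Int × Int))) (h : Int) :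
    (pvB_byEnd cs bf).getD h [] = ((pvPairs cs bf).filter (fun p => p.1 == h)).map (·.2) := by
  unfold pvB_byEnd pvPairs pvB_push
  have h1 : ∀ (d : PySem.Dict Int (List (Int × Int))) (sc : Int × Char),
      (bf.getD sc.2 []).foldl (fun d2 kw =>
        d2.modify (sc.1 + kw.2) [] (fun l => l ++ [(sc.1, kw.1)])) d
      = ((bf.getD sc.2 []).map (fun kw => (sc.1 + kw.2, (sc.1, kw.1)))).foldl
          (fun d p => d.modify p.1 [] (fun l => l ++ [p.2])) d := by
    intro d sc
    rw [List.foldl_map]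
  simp only [h1]
  rw [← List.foldl_flatMap, PySem.Dict.getD_foldl_modify_append]
  simp [PySem.Dict.getD_empty]

lemma pv_pairs_eq (cs : List Char) (dict : List (Int × List String)) :
    pvPairs cs (pvB_byFirst dict) = (pvA_useWords cs dict).map (fun w => (w.2.1, (w.1, w.2.2.1))) := by
  rw [pvA_useWords_eq, List.map_flatMap]
  unfold pvPairs
  rw [PySem.List.enumerate_eq_map_pyRange cs ' ', PySem.List.len_eq, PySem.List.pyRange_zero_nat,
    List.map_map, List.flatMap_map]
  apply List.flatMap_congr
  intro s hs
  rw [List.mem_range] at hs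
  simp only [Function.comp_apply, PySem.List.pyGetD_natCast]
  rw [pvB_byFirst_getD, List.map_map, List.map_map]
  rfl

lemma pvB_byEnd_getD_uw (cs : List Char) (dict : List (Int × List String)) (h : Int) :
    (pvB_byEnd cs (pvB_byFirst dict)).getD h [] =
      ((pvA_useWords cs dict).filter (fun w => w.2.1 == h)).map (fun w => (w.1, w.2.2.1)) := by
  rw [pvB_byEnd_getD, pv_pairs_eq, List.filter_map, List.map_map]
  rfl

lemma pvB_paths_inv (cs : List Char) (dict : List (Int × List String))
    (hg : ∀ kd ∈ dict, pvGoodWord kd = true) :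
    ∀ m, m ≤ cs.length →
    (PySem.List.pyRange 1 ((m : Int) + 1)).foldl (fun ps h =>
        ps ++ [((pvB_byEnd cs (pvB_byFirst dict)).getD h []).foldl
          (fun lvl sk => lvl ++ ((ps.getD sk.1.toNat []).map (fun q => q ++ [sk.2]))) []]) [[[]]]
      = (List.range (m+1)).map (pvF (pvA_useWords cs dict)) := by
  intro m
  induction m with
  | zero =>
    intro _
    rw [show ((0 : Nat) : Int) + 1 = 1 by norm_num, PySem.List.pyRange_one_eq_nil le_rfl]
    simp [pvF]
  | succ m ih =>
    intro hm
    have hm' : m ≤ cs.length := by omega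
    have hsplit : PySem.List.pyRange 1 (((m+1 : Nat) : Int) + 1)
        = PySem.List.pyRange 1 ((m : Int) + 1) ++ [(m : Int) + 1] := by
      push_cast
      exact PySem.List.pyRange_one_succ_right (by omega)
    rw [hsplit, List.foldl_append, ih hm']
    simp only [List.foldl_cons, List.foldl_nil]
    have hlevel : ((pvB_byEnd cs (pvB_byFirst dict)).getD ((m : Int) + 1) []).foldl
        (fun lvl sk => lvl ++ ((((List.range (m+1)).map (pvF (pvA_useWords cs dict))).getD sk.1.toNat []).map
          (fun q => q ++ [sk.2]))) []
        = pvF (pvA_useWords cs dict) (m+1) := by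
      rw [PySem.List.foldl_append_eq_flatMap, pvB_byEnd_getD_uw, pv_flatMap_filter_map]
      conv_rhs => rw [pvF]
      rw [List.nil_append]
      apply List.flatMap_congr
      intro w hw
      obtain ⟨hw0, hwlt⟩ := pv_goodUW cs dict hg w hw
      by_cases hend : w.2.1 = (m : Int) + 1
      · rw [if_pos (by simpa using hend), dif_pos ⟨hend, hw0, by omega⟩,
          PySem.List.getD_map_range _ _ _ _ (by omega : w.1.toNat < m + 1)]
      · rw [if_neg (by simpa using hend), dif_neg (fun hc => hend hc.1)]
    rw [hlevel]
    simp [List.range_succ]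

lemma pvB_main (context_ : String) (dict : List (Int × List String))
    (hg : ∀ kd ∈ dict, pvGoodWord kd = true) :
    make_lattice_alt context_ dict =
      (pvF (pvA_useWords context_.toList dict) context_.toList.length).map (fun q => 0 :: (q ++ [-1])) := by
  unfold make_lattice_alt
  dsimp only
  rw [pvB_paths_inv context_.toList dict hg context_.toList.length le_rfl,
    PySem.List.getD_map_range _ _ _ _ (by omega : context_.toList.length < context_.toList.length + 1)]

-- ===== VERDICT (by name: the statement is the Claim_ definition above) =====
theorem make_lattice_spec : Claim_equal_make_lattice := by
  intro context_ dict _ hpre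
  unfold Spec_make_lattice
  rw [pvA_main context_ dict hpre.1, pvB_main context_ dict hpre.1]
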